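-- pv_equiv track=rewrite | github.com/lloxis/ds_info_annale_1 | main.py | bornes_plage_max
-- ===== SOURCE A (Python) =====
-- def bornes_plage_max(liste, seuil):
--     # si toutrs les valeurs sont supérieures au seuil on renvoie 0, -1
--     for i in range(len(liste)):
--         if liste[i] < seuil:
--             break
--         if i >= len(liste) - 1:
--             return 0, -1
--
--     max_k = 0
--     b = 0
--     k = 0
--     for i in range(len(liste)):
--         if liste[i] <= seuil:
--             k += 1
--         else:
--             k = 0
--         if k > max_k:
--             max_k = k
--             b = i
--     return b - max_k + 1, b
-- ===== SOURCE B (Python) =====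
-- def bornes_plage_max(liste, seuil):
--     # guard: non-empty list with no value strictly below the threshold
--     if liste and not any(x < seuil for x in liste):
--         return 0, -1
--     # phase 1: collect maximal runs of values <= seuil as (start, end) pairs
--     runs = []
--     i = 0
--     n = len(liste)
--     while i < n:
--         if liste[i] <= seuil:
--             j = i
--             while j + 1 < n and liste[j + 1] <= seuil:
--                 j += 1
--             runs.append((i, j))
--             i = j + 1
--         else:
--             i += 1
--     # phase 2: pick the longest run, keeping the first on ties
--     best_len = 0
--     best_end = 0
--     for start, end in runs:
--         if end - start + 1 > best_len:
--             best_len = end - start + 1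
--             best_end = end
--     return best_end - best_len + 1, best_end
-- ===== Notes on version B (the rewrite author's own statement) =====
-- stated objective: alternative
-- what changed: Replaces A's single fused index scan with running counters (k, max_k, b) by a guard via any(), an explicit two-pointer extraction of maximal runs of values <= seuil as (start, end) pairs, and a separate longest-run selection pass (first on ties).
import Mathlib
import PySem

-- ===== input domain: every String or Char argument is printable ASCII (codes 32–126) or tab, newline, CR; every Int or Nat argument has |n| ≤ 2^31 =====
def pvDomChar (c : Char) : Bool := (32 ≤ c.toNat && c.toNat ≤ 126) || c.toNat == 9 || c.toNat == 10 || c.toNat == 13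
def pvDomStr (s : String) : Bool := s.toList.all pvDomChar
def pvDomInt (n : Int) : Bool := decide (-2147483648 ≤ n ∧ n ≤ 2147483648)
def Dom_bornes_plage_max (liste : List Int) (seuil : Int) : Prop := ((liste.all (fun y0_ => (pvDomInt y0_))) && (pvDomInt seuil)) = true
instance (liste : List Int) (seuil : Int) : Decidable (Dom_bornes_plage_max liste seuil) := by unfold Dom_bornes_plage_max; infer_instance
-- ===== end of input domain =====

-- B restructures A's single fused scan into guard-by-any + explicit run extraction + a
-- separate longest-run selection pass (objective: alternative; same O(n) cost).

-- ===== PORT A =====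
-- guard loop: for i in range(len(liste)): if liste[i] < seuil: break; if i >= len-1: return 0,-1
def pvGuardA (liste : List Int) (seuil : Int) : Bool :=
  match liste with
  | [] => false
  | x :: rest => if x < seuil then false else if rest = [] then true else pvGuardA rest seuil

-- main loop of A: state (max_k, b, k), current index i, one step per element
def pvLoopA (liste : List Int) (seuil : Int) (i maxk b k : Int) : Int × Int :=
  match liste with
  | [] => (maxk, b)
  | x :: rest =>
    let k' := if x ≤ seuil then k + 1 else 0
    if k' > maxk then pvLoopA rest seuil (i + 1) k' i k'
    else pvLoopA rest seuil (i + 1) maxk b k'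

def bornes_plage_max (liste : List Int) (seuil : Int) : Int × Int :=
  if pvGuardA liste seuil then (0, -1)
  else
    let p := pvLoopA liste seuil 0 0 0 0
    (p.2 - p.1 + 1, p.2)

-- ===== PORT B =====
-- phase 1 of B: two-pointer extraction of maximal runs of values ≤ seuil, as (start, end)
def pvRunsB (liste : List Int) (seuil : Int) (i : Int) : List (Int × Int) :=
  match liste with
  | [] => []
  | x :: rest =>
    if x ≤ seuil then
      -- the inner 'while j+1 < n and liste[j+1] <= seuil' advance
      let run := rest.takeWhile (fun y => decide (y ≤ seuil))
      let rest' := rest.dropWhile (fun y => decide (y ≤ seuil))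
      let j := i + (run.length : Int)
      (i, j) :: pvRunsB rest' seuil (j + 1)
    else
      pvRunsB rest seuil (i + 1)
termination_by liste.length
decreasing_by
  · simpa using Nat.lt_succ_of_le (rest.length_dropWhile_le (fun y => decide (y ≤ seuil)))
  · simp

-- phase 2 of B: pick the longest run, first on ties
def pvSelectB (runs : List (Int × Int)) (bl be : Int) : Int × Int :=
  match runs with
  | [] => (bl, be)
  | (s, e) :: rs =>
    if e - s + 1 > bl then pvSelectB rs (e - s + 1) e else pvSelectB rs bl be

def bornes_plage_max_alt (liste : List Int) (seuil : Int) : Int × Int :=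
  if !liste.isEmpty && !(liste.any (fun x => decide (x < seuil))) then (0, -1)
  else
    let p := pvSelectB (pvRunsB liste seuil 0) 0 0
    (p.2 - p.1 + 1, p.2)

-- ===== PRECONDITION & SPEC =====
def Spec_bornes_plage_max (liste : List Int) (seuil : Int) (out : Int × Int) : Prop := out = bornes_plage_max_alt liste seuil
instance (liste : List Int) (seuil : Int) (out : Int × Int) : Decidable (Spec_bornes_plage_max liste seuil out) := by unfold Spec_bornes_plage_max; infer_instance

-- ===== CLAIM (what is proved, stated in full; the proofs are below) =====
def Claim_equal_bornes_plage_max : Prop := ∀ (liste : List Int) (seuil : Int), Dom_bornes_plage_max liste seuil → Spec_bornes_plage_max liste seuil (bornes_plage_max liste seuil)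

-- ===== LEMMAS AND PROOFS =====

-- A's guard loop is the 'non-empty and no element strictly below the threshold' test
theorem pvGuard_eq (liste : List Int) (seuil : Int) :
    pvGuardA liste seuil = (!liste.isEmpty && !(liste.any (fun x => decide (x < seuil)))) := by
  induction liste with
  | nil => rfl
  | cons x rest ih =>
    simp only [pvGuardA, List.any_cons, List.isEmpty_cons]
    by_cases hx : x < seuil
    · simp [hx]
    · by_cases hr : rest = []
      · simp [hx, hr]
      · rw [if_neg hx, if_neg hr, ih]
        cases rest with
        | nil => exact absurd rfl hr
        | cons y t => simp [hx]

-- an element above the threshold resets k and never improves (maxk, b)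
theorem pvLoopA_skip (x : Int) (rest : List Int) (seuil i maxk b k : Int)
    (hx : ¬ x ≤ seuil) (hmk : 0 ≤ maxk) :
    pvLoopA (x :: rest) seuil i maxk b k = pvLoopA rest seuil (i + 1) maxk b 0 := by
  simp only [pvLoopA, if_neg hx]
  rw [if_neg (by omega)]

-- processing a block of elements ≤ seuil from a state with k ≤ maxk
theorem pvLoopA_run (seuil : Int) (run : List Int) :
    ∀ (rest : List Int) (i maxk b k : Int), (∀ y ∈ run, y ≤ seuil) → k ≤ maxk →
    pvLoopA (run ++ rest) seuil i maxk b k =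
      pvLoopA rest seuil (i + (run.length : Int))
        (if k + (run.length : Int) > maxk then k + (run.length : Int) else maxk)
        (if k + (run.length : Int) > maxk then i + (run.length : Int) - 1 else b)
        (k + (run.length : Int)) := by
  induction run with
  | nil =>
    intro rest i maxk b k _ hk
    simp only [List.nil_append, List.length_nil, Int.natCast_zero, add_zero]
    rw [if_neg (by omega), if_neg (by omega)]
  | cons y run' ih =>
    intro rest i maxk b k hall hk
    have hy : y ≤ seuil := hall y (List.mem_cons_self ..)
    have hall' : ∀ z ∈ run', z ≤ seuil := fun z hz => hall z (List.mem_cons_of_mem _ hz)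
    simp only [List.cons_append, pvLoopA, if_pos hy]
    by_cases h1 : k + 1 > maxk
    · rw [if_pos h1, ih rest (i + 1) (k + 1) i (k + 1) hall' le_rfl]
      congr 1 <;> simp only [List.length_cons] <;> push_cast <;>
        first
        | (split_ifs <;> omega)
        | omega
    · rw [if_neg h1, ih rest (i + 1) maxk b (k + 1) hall' (by omega)]
      congr 1 <;> simp only [List.length_cons] <;> push_cast <;>
        first
        | (split_ifs <;> omega)
        | omega

-- unfold equations of pvRunsB (well-founded recursion)
theorem pvRunsB_nil (seuil i : Int) : pvRunsB [] seuil i = [] := by rw [pvRunsB]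

theorem pvRunsB_cons_le (x : Int) (rest : List Int) (seuil i : Int) (hx : x ≤ seuil) :
    pvRunsB (x :: rest) seuil i =
      (i, i + ((rest.takeWhile (fun y => decide (y ≤ seuil))).length : Int)) ::
        pvRunsB (rest.dropWhile (fun y => decide (y ≤ seuil))) seuil
          (i + ((rest.takeWhile (fun y => decide (y ≤ seuil))).length : Int) + 1) := by
  rw [pvRunsB]; simp [hx]

theorem pvRunsB_cons_gt (x : Int) (rest : List Int) (seuil i : Int) (hx : ¬ x ≤ seuil) :
    pvRunsB (x :: rest) seuil i = pvRunsB rest seuil (i + 1) := by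
  rw [pvRunsB]; simp [hx]

-- the core correspondence: A's fused scan from (maxk, b, 0) equals B's run selection
theorem pvMain (seuil : Int) :
    ∀ (n : Nat) (liste : List Int), liste.length = n → ∀ (i maxk b : Int), 0 ≤ maxk →
    pvLoopA liste seuil i maxk b 0 = pvSelectB (pvRunsB liste seuil i) maxk b := by
  intro n
  induction n using Nat.strong_induction_on with
  | _ n IH =>
    intro liste hlen i maxk b hmk
    match liste with
    | [] => simp [pvLoopA, pvRunsB_nil, pvSelectB]
    | x :: rest =>
      by_cases hx : x ≤ seuil
      · -- x starts the run x :: rest.takeWhile (· ≤ seuil)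
        rw [pvRunsB_cons_le x rest seuil i hx]
        have hsplit : rest.takeWhile (fun y => decide (y ≤ seuil)) ++
            rest.dropWhile (fun y => decide (y ≤ seuil)) = rest :=
          List.takeWhile_append_dropWhile
        have hallrun : ∀ z ∈ x :: rest.takeWhile (fun y => decide (y ≤ seuil)), z ≤ seuil := by
          intro z hz
          rcases List.mem_cons.mp hz with h | h
          · exact h ▸ hx
          · simpa using List.mem_takeWhile_imp h
        rw [show x :: rest = (x :: rest.takeWhile (fun y => decide (y ≤ seuil))) ++
              rest.dropWhile (fun y => decide (y ≤ seuil)) from by simp [hsplit]]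
        rw [pvLoopA_run seuil _ _ i maxk b 0 hallrun hmk]
        set L : Int := ((rest.takeWhile (fun y => decide (y ≤ seuil))).length : Int) with hL
        have hL0 : 0 ≤ L := by positivity
        have hlen_run : (((x :: rest.takeWhile (fun y => decide (y ≤ seuil))).length : Nat) : Int)
            = L + 1 := by
          simp only [List.length_cons]; push_cast; ring
        rw [hlen_run]
        cases hdw : rest.dropWhile (fun y => decide (y ≤ seuil)) with
        | nil =>
          rw [pvRunsB_nil]
          simp only [pvLoopA, pvSelectB]
          have he : (i + L) - i + 1 = L + 1 := by ring
          rw [he]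
          split_ifs with hc1 hc2 hc2 <;> simp only [Prod.mk.injEq] <;> omega
        | cons y rest'' =>
          have hy : ¬ y ≤ seuil := by
            have := List.head?_dropWhile_not (fun y => decide (y ≤ seuil)) rest
            rw [hdw] at this
            simpa using this
          rw [pvLoopA_skip y rest'' seuil _ _ _ _ hy (by split_ifs <;> omega)]
          have hlt : rest''.length < n := by
            have h1 := congrArg List.length hsplit
            rw [hdw] at h1
            simp only [List.length_append, List.length_cons] at h1 hlen
            omega
          rw [IH rest''.length hlt rest'' rfl _ _ _ (by split_ifs <;> omega)]
          simp only [pvSelectB]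
          have he : (i + L) - i + 1 = L + 1 := by ring
          rw [he]
          rw [pvRunsB_cons_gt y rest'' seuil (i + L + 1) hy,
            show i + (L + 1) + 1 = i + L + 1 + 1 by ring]
          split_ifs with hc1 hc2 hc2
          · rw [show (0 : Int) + (L + 1) = L + 1 by ring, show i + (L + 1) - 1 = i + L by ring]
          · omega
          · omega
          · rfl
      · -- x > seuil: both sides skip it
        rw [pvRunsB_cons_gt x rest seuil i hx,
          pvLoopA_skip x rest seuil i maxk b 0 hx hmk]
        have hlt : rest.length < n := by simp only [List.length_cons] at hlen; omega
        exact IH rest.length hlt rest rfl (i + 1) maxk b hmk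

-- ===== VERDICT (by name: the statement is the Claim_ definition above) =====
theorem bornes_plage_max_spec : Claim_equal_bornes_plage_max := by
  intro liste seuil _
  unfold Spec_bornes_plage_max bornes_plage_max bornes_plage_max_alt
  rw [pvGuard_eq]
  by_cases hg : (!liste.isEmpty && !(liste.any (fun x => decide (x < seuil)))) = true
  · rw [if_pos hg, if_pos hg]
  · rw [if_neg hg, if_neg hg,
      pvMain seuil liste.length liste rfl 0 0 0 le_rfl]
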